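-- pv_equiv track=rewrite | github.com/nagybatorakos/Beadando | EX_31.py | felhasznalo
-- ===== SOURCE A (Python) =====
-- import string
--
-- def felhasznalo(n):
--     if "@" in n:
--         k=n.find("@")
--         fh=n[:k]
--         a=string.ascii_letters + string.digits
--         if len(fh)>1:
--             if (fh[0] in a) and (fh[-1] in a):
--                 a+="-"+"_"+"."
--                 for i in range(len(fh)):
--                     if (fh[i]=="." and (fh[i+1]=="." or fh[i-1]==".")) or (fh[i] not in a):
--                         return False
--     return True
-- ===== SOURCE B (Python) =====
-- import string
--
-- def felhasznalo(n):
--     if "@" in n: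
--         fh = n[:n.find("@")]
--         alnum = string.ascii_letters + string.digits
--         if len(fh) > 1 and fh[0] in alnum and fh[-1] in alnum:
--             body = set(alnum + "-_")
--             return all(tok != "" and set(tok) <= body for tok in fh.split("."))
--     return True
-- ===== Notes on version B (the rewrite author's own statement) =====
-- stated objective: alternative
-- what changed: Keeps the outer guards but validates the local part by splitting it at dots and checking that every dot-separated token is nonempty and a subset of the letters/digits/hyphen/underscore set, instead of A's index-walking loop with prev/next neighbour lookups; consecutive dots surface as empty tokens.
import Mathlib
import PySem

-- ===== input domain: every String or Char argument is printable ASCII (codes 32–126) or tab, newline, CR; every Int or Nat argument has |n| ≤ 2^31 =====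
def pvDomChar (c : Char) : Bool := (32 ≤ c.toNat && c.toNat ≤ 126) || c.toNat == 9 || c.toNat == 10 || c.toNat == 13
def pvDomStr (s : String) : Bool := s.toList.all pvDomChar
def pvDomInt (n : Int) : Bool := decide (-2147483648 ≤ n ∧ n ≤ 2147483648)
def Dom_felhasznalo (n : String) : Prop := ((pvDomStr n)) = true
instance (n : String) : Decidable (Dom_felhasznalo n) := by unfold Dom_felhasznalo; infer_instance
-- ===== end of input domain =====

-- B keeps A's outer guards but validates the local part by splitting it at dots and checking every
-- dot-separated token is nonempty and a subset of the letters/digits/hyphen/underscore set, instead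
-- of A's index-walking loop with prev/next neighbour lookups: alternative decomposition, same cost.

-- ===== PORT A =====
-- string.ascii_letters + string.digits
def pvAlnum : List Char := "abcdefghijklmnopqrstuvwxyzABCDEFGHIJKLMNOPQRSTUVWXYZ0123456789".toList

-- Python 'c in a' for a one-character c and a string a
def pvInStr (c : Char) (a : List Char) : Bool := PySem.Chars.isIn [c] a

-- Python 'fh[i] in a' (index may be negative; none = IndexError, unreachable under A's guards)
def pvGetIn (fh : List Char) (i : Int) (a : List Char) : Bool :=
  match PySem.List.pyGet? fh i with
  | some c => pvInStr c a
  | none => false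

-- the loop-body condition of A at index j
def pvBad (fh a : List Char) (j : Nat) : Bool :=
  ((PySem.List.pyGet? fh (j : Int) == some '.') &&
   (PySem.List.pyGet? fh ((j : Int) + 1) == some '.' ||
    PySem.List.pyGet? fh ((j : Int) - 1) == some '.'))
  || !(pvGetIn fh (j : Int) a)

-- 'for i in range(len(fh)): if <bad>: return False' then fall through
def pvLoopA (fh a : List Char) (i : Nat) : Bool :=
  if _h : i < fh.length then
    if pvBad fh a i then false else pvLoopA fh a (i + 1)
  else true
termination_by fh.length - i

def felhasznalo (n : String) : Bool :=
  let s := n.toList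
  if PySem.Chars.isIn ['@'] s then
    let k := PySem.Chars.find s ['@']
    let fh := PySem.List.slice s none (some k)
    let a := pvAlnum
    if fh.length > 1 then
      if pvGetIn fh 0 a && pvGetIn fh (-1) a then
        pvLoopA fh (a ++ ['-', '_', '.']) 0
      else true
    else true
  else true

-- ===== PORT B =====
-- alnum + "-_", kept as a Python set (body = set(alnum + "-_"))
def pvBody : List Char := pvAlnum ++ ['-', '_']
def pvBodySet : PySem.Set Char := PySem.Set.ofList pvBody

def felhasznalo_alt (n : String) : Bool :=
  let s := n.toList
  if PySem.Chars.isIn ['@'] s then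
    let fh := PySem.List.slice s none (some (PySem.Chars.find s ['@']))
    if decide (fh.length > 1) && pvGetIn fh 0 pvAlnum && pvGetIn fh (-1) pvAlnum then
      -- all(tok != "" and set(tok) <= body for tok in fh.split("."))
      (PySem.Chars.splitOn fh ['.']).all
        (fun tok => !tok.isEmpty && PySem.Set.issubset (PySem.Set.ofList tok) pvBodySet)
    else true
  else true

-- ===== PRECONDITION & SPEC =====
def Spec_felhasznalo (n : String) (out : Bool) : Prop := out = felhasznalo_alt n
instance (n : String) (out : Bool) : Decidable (Spec_felhasznalo n out) := by unfold Spec_felhasznalo; infer_instance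

-- ===== CLAIM (what is proved, stated in full; the proofs are below) =====
def Claim_equal_felhasznalo : Prop := ∀ (n : String), Dom_felhasznalo n → Spec_felhasznalo n (felhasznalo n)

-- ===== LEMMAS AND PROOFS =====

-- ---- proof-side helpers ----

-- token predicate of B with the set test replaced by a plain char pass
def pvGoodTok (tok : List Char) : Bool := !tok.isEmpty && tok.all (fun c => pvInStr c pvBody)

-- "no adjacent dots, all chars in alnum+-_. , and (unless b) not starting with a dot"
def pvT (b : Bool) : List Char → Bool
  | [] => true
  | c :: rest => if c = '.' then b && pvT false rest else pvInStr c pvBody && pvT true rest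

-- has two adjacent dots
def pvDD : List Char → Bool
  | c1 :: c2 :: rest => (c1 == '.' && c2 == '.') || pvDD (c2 :: rest)
  | _ => false

-- ---- A-side loop characterisation ----

lemma pvLoopA_eq_true_iff (fh a : List Char) (i : Nat) :
    pvLoopA fh a i = true ↔ ∀ j, i ≤ j → j < fh.length → pvBad fh a j = false := by
  have H : ∀ k i, fh.length - i ≤ k →
      (pvLoopA fh a i = true ↔ ∀ j, i ≤ j → j < fh.length → pvBad fh a j = false) := by
    intro k
    induction k with
    | zero =>
      intro i hk
      have hnot : ¬ i < fh.length := by omega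
      rw [pvLoopA]
      simp only [hnot, dite_false]
      constructor
      · intro _ j hij hj; omega
      · intro _; trivial
    | succ k ih =>
      intro i hk
      rw [pvLoopA]
      by_cases h : i < fh.length
      · simp only [h, dite_true]
        by_cases hb : pvBad fh a i = true
        · simp only [hb, if_true]
          constructor
          · intro h'; exact absurd h' (by simp)
          · intro hall; rw [hall i le_rfl h] at hb; simp at hb
        · have hb' : pvBad fh a i = false := by simpa using hb
          simp only [hb', Bool.false_eq_true, if_false]
          rw [ih (i + 1) (by omega)]
          constructor
          · intro hall j hij hj
            rcases Nat.eq_or_lt_of_le hij with rfl | hlt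
            · exact hb'
            · exact hall j hlt hj
          · intro hall j hij hj; exact hall j (by omega) hj
      · simp only [h, dite_false]
        constructor
        · intro _ j hij hj; omega
        · intro _; trivial
  exact H (fh.length - i) i le_rfl

lemma pvPrefix_pair (x y : Char) (l : List Char) :
    [x, y] <+: l ↔ l[0]? = some x ∧ l[1]? = some y := by
  match l with
  | [] => simp
  | [c] => simp [List.prefix_cons_iff]
  | c :: d :: t =>
    constructor
    · rintro ⟨u, hu⟩
      simp only [List.cons_append] at hu
      cases hu; simp
    · rintro ⟨h1, h2⟩
      simp only [List.getElem?_cons_zero, List.getElem?_cons_succ, Option.some.injEq] at h1 h2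
      subst h1
      have : d = y := by simpa using h2
      subst this
      exact ⟨t, rfl⟩

lemma pvDots_iff (fh : List Char) :
    PySem.Chars.isIn ['.', '.'] fh = true ↔
      ∃ j : Nat, fh[j]? = some '.' ∧ fh[j + 1]? = some '.' := by
  rw [← PySem.Chars.exists_prefix_drop_iff_isIn]
  constructor
  · rintro ⟨j, hj⟩
    rw [pvPrefix_pair] at hj
    exact ⟨j, by simpa [List.getElem?_drop] using hj.1, by simpa [List.getElem?_drop, Nat.add_comm] using hj.2⟩
  · rintro ⟨j, h1, h2⟩
    exact ⟨j, (pvPrefix_pair _ _ _).mpr ⟨by simpa [List.getElem?_drop] using h1, by simpa [List.getElem?_drop, Nat.add_comm] using h2⟩⟩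

lemma pvAlnum_no_dot (c : Char) (h : pvInStr c pvAlnum = true) : c ≠ '.' := by
  rintro rfl
  revert h
  decide

lemma pvKey (fh : List Char) (h0 : pvGetIn fh 0 pvAlnum = true) :
    pvLoopA fh (pvAlnum ++ ['-', '_', '.']) 0 =
      (if PySem.Chars.isIn ['.', '.'] fh then false
       else fh.all (fun c => pvInStr c (pvAlnum ++ ['-', '_', '.']))) := by
  have hcast : ∀ j : Nat, PySem.List.pyGet? fh ((j : Nat) : Int) = fh[j]? :=
    fun j => PySem.List.pyGet?_natCast fh j
  obtain ⟨c0, hc0, hc0mem⟩ : ∃ c, fh[0]? = some c ∧ pvInStr c pvAlnum = true := by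
    unfold pvGetIn at h0
    rw [show ((0 : Int)) = ((0 : Nat) : Int) by norm_num, hcast] at h0
    cases hg : fh[0]? with
    | none => rw [hg] at h0; simp at h0
    | some c => rw [hg] at h0; exact ⟨c, rfl, h0⟩
  have hc0ne : c0 ≠ '.' := pvAlnum_no_dot _ hc0mem
  by_cases hd : PySem.Chars.isIn ['.', '.'] fh = true
  · simp only [hd, if_true]
    obtain ⟨j, hj1, hj2⟩ := (pvDots_iff fh).mp hd
    have hjlen : j < fh.length := (List.getElem?_eq_some_iff.mp hj1).1
    rw [← Bool.not_eq_true]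
    intro ht
    have hbad := (pvLoopA_eq_true_iff _ _ _).mp ht j (Nat.zero_le j) hjlen
    unfold pvBad at hbad
    rw [hcast j, show ((j : Int) + 1) = (((j + 1 : Nat)) : Int) by push_cast; ring,
      hcast (j + 1)] at hbad
    simp [hj1, hj2] at hbad
  · rw [Bool.not_eq_true] at hd
    rw [hd]
    simp only [Bool.false_eq_true, if_false]
    by_cases hall : fh.all (fun c => pvInStr c (pvAlnum ++ ['-', '_', '.'])) = true
    · rw [hall, pvLoopA_eq_true_iff]
      intro j _ hjlen
      have hcj : fh[j]? = some fh[j] := List.getElem?_eq_getElem hjlen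
      have hmemj : pvInStr fh[j] (pvAlnum ++ ['-', '_', '.']) = true := by
        rw [List.all_eq_true] at hall
        exact hall _ (List.getElem_mem hjlen)
      unfold pvBad pvGetIn
      rw [hcast j, hcj]
      simp only [hmemj, Bool.not_true, Bool.or_false]
      by_cases hdot : fh[j] = '.'
      · have hn1 : ¬ fh[j + 1]? = some '.' := by
          intro h
          rw [(pvDots_iff fh).mpr ⟨j, by rw [hcj, hdot], h⟩] at hd
          cases hd
        match j with
        | 0 =>
          exfalso
          rw [hcj] at hc0
          exact hc0ne (by rw [← hdot]; exact (Option.some.injEq _ _ ▸ hc0).symm ▸ rfl)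
        | j' + 1 =>
          have hn2 : ¬ fh[j']? = some '.' := by
            intro h
            rw [(pvDots_iff fh).mpr ⟨j', h, by rw [hcj, hdot]⟩] at hd
            cases hd
          rw [show (((j' + 1 : Nat) : Int) + 1) = (((j' + 2 : Nat)) : Int) by push_cast; ring,
            hcast (j' + 2),
            show (((j' + 1 : Nat) : Int) - 1) = ((j' : Nat) : Int) by push_cast; ring,
            hcast j']
          cases hg1 : fh[j' + 1 + 1]? with
          | none => cases hg2 : fh[j']? with
            | none => simp
            | some c => simp [show ¬ c = '.' from fun h => hn2 (by rw [hg2, h])]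
          | some c1 => cases hg2 : fh[j']? with
            | none => simp [show ¬ c1 = '.' from fun h => hn1 (by rw [hg1, h])]
            | some c2 =>
              simp [show ¬ c1 = '.' from fun h => hn1 (by rw [hg1, h]),
                show ¬ c2 = '.' from fun h => hn2 (by rw [hg2, h])]
      · simp [hdot]
    · have hall' : fh.all (fun c => pvInStr c (pvAlnum ++ ['-', '_', '.'])) = false :=
        Bool.eq_false_iff.mpr hall
      rw [hall', ← Bool.not_eq_true]
      intro ht
      rw [List.all_eq_false] at hall'
      obtain ⟨c, hcmem, hcnot⟩ := hall'
      obtain ⟨j, hjlen, hje⟩ := List.getElem_of_mem hcmem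
      have hbad := (pvLoopA_eq_true_iff _ _ _).mp ht j (Nat.zero_le j) hjlen
      unfold pvBad pvGetIn at hbad
      rw [hcast j, List.getElem?_eq_getElem hjlen, hje] at hbad
      simp [hcnot] at hbad

-- ---- B-side lemmas ----

lemma pvPrefix_single (x : Char) (l : List Char) : [x] <+: l ↔ l[0]? = some x := by
  cases l with
  | nil => simp
  | cons c t => simp [List.prefix_cons_iff, eq_comm]

lemma pvInStr_mem (c : Char) (a : List Char) : pvInStr c a = true ↔ c ∈ a := by
  unfold pvInStr
  rw [← PySem.Chars.exists_prefix_drop_iff_isIn]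
  constructor
  · rintro ⟨j, hj⟩
    rw [pvPrefix_single] at hj
    exact List.mem_of_getElem? (by simpa [List.getElem?_drop] using hj)
  · intro hc
    obtain ⟨j, hjlen, hje⟩ := List.getElem_of_mem hc
    exact ⟨j, (pvPrefix_single _ _).mpr (by simp [List.getElem?_drop, hjlen, hje])⟩

lemma pvInStr_allowed_of_ne (c : Char) (hc : c ≠ '.') :
    pvInStr c (pvAlnum ++ ['-', '_', '.']) = pvInStr c pvBody := by
  rw [Bool.eq_iff_iff, pvInStr_mem, pvInStr_mem]
  simp only [pvBody, List.mem_append, List.mem_cons, List.not_mem_nil, or_false]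
  tauto

lemma pvDot_allowed : pvInStr '.' (pvAlnum ++ ['-', '_', '.']) = true := by decide

lemma pvDD_cons (c : Char) (rest : List Char) :
    pvDD (c :: rest) = (((c == '.') && (rest.head? == some '.')) || pvDD rest) := by
  cases rest with
  | nil => simp [pvDD]
  | cons d t => simp [pvDD]

lemma pvDD_iff (l : List Char) :
    pvDD l = true ↔ ∃ j : Nat, l[j]? = some '.' ∧ l[j + 1]? = some '.' := by
  induction l with
  | nil => simp [pvDD]
  | cons c rest ih =>
    rw [pvDD_cons]
    constructor
    · intro h
      rcases Bool.or_eq_true_iff.mp h with h | h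
      · obtain ⟨h1, h2⟩ := Bool.and_eq_true_iff.mp h
        refine ⟨0, by simpa using h1, ?_⟩
        cases rest with
        | nil => simp at h2
        | cons d t => simpa using h2
      · obtain ⟨j, h1, h2⟩ := ih.mp h
        exact ⟨j + 1, by simpa using h1, by simpa using h2⟩
    · rintro ⟨j, h1, h2⟩
      cases j with
      | zero =>
        apply Bool.or_eq_true_iff.mpr
        left
        apply Bool.and_eq_true_iff.mpr
        refine ⟨by simpa using h1, ?_⟩
        cases rest with
        | nil => simp at h2
        | cons d t => simpa using h2
      | succ j' =>
        apply Bool.or_eq_true_iff.mpr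
        right
        exact ih.mpr ⟨j', by simpa using h1, by simpa using h2⟩

lemma pvDD_eq_isIn (l : List Char) : pvDD l = PySem.Chars.isIn ['.', '.'] l := by
  rw [Bool.eq_iff_iff, pvDD_iff, pvDots_iff]

lemma pvT_eq (l : List Char) : ∀ b : Bool,
    pvT b l = (!pvDD l && l.all (fun c => pvInStr c (pvAlnum ++ ['-', '_', '.'])) &&
               (b || !(l.head? == some '.'))) := by
  induction l with
  | nil => intro b; simp [pvT, pvDD]
  | cons c rest ih =>
    intro b
    by_cases hc : c = '.'
    · subst hc
      rw [pvT, if_pos rfl, ih false, pvDD_cons]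
      simp only [List.all_cons, pvDot_allowed, List.head?_cons, beq_self_eq_true, Bool.true_and,
        Bool.or_false, Bool.true_or]
      cases b <;> cases hdd : pvDD rest <;> cases hh : (rest.head? == some '.') <;>
        cases ha : rest.all (fun c => pvInStr c (pvAlnum ++ ['-', '_', '.'])) <;> simp
    · rw [pvT, if_neg hc, ih true, pvDD_cons]
      have hcb : (c == '.') = false := by simpa using hc
      simp only [List.all_cons, List.head?_cons, hcb, Bool.false_and, Bool.false_or,
        pvInStr_allowed_of_ne c hc, Bool.or_true, Bool.and_true]
      have hne : (some c == some '.') = false := by simpa using hc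
      rw [hne]
      cases pvInStr c pvBody <;> cases hdd : pvDD rest <;>
        cases ha : rest.all (fun c => pvInStr c (pvAlnum ++ ['-', '_', '.'])) <;> cases b <;> simp
  termination_by l => l.length

lemma pvW (l : List Char) (hlast : l.getLast? ≠ some '.') :
    ((match List.splitOnP (fun c => c == '.') l with
      | [] => true
      | t :: ts => t.all (fun c => pvInStr c pvBody) && ts.all pvGoodTok) = pvT true l)
    ∧ (l ≠ [] → (List.splitOnP (fun c => c == '.') l).all pvGoodTok = pvT false l) := by
  induction l with
  | nil =>
    refine ⟨?_, fun h => absurd rfl h⟩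
    simp [List.splitOnP_nil, pvT]
  | cons c rest ih =>
    cases rest with
    | nil =>
      have hc : c ≠ '.' := by
        intro h; exact hlast (by simp [h])
      have hcb : (c == '.') = false := by simpa using hc
      constructor
      · simp [List.splitOnP_cons, List.splitOnP_nil, hcb, pvT, hc]
      · intro _
        simp [List.splitOnP_cons, List.splitOnP_nil, hcb, pvT, hc, pvGoodTok]
    | cons r rs =>
      have hlast' : (r :: rs).getLast? ≠ some '.' := by
        rwa [List.getLast?_cons_cons] at hlast
      obtain ⟨ih1, ih2⟩ := ih hlast'
      have ih2' := ih2 (by simp)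
      by_cases hc : c = '.'
      · subst hc
        have hsp := List.splitOnP_ne_nil (fun c => c == '.') (r :: rs)
        constructor
        · rw [List.splitOnP_cons]
          simp only [beq_self_eq_true, if_true]
          rw [pvT, if_pos rfl]
          simp only [List.all_nil, Bool.true_and]
          rw [← ih2']
        · intro _
          rw [List.splitOnP_cons]
          simp only [beq_self_eq_true, if_true]
          rw [pvT, if_pos rfl]
          simp [pvGoodTok]
      · have hcb : (c == '.') = false := by simpa using hc
        cases hs : List.splitOnP (fun c => c == '.') (r :: rs) with
        | nil => exact absurd hs (List.splitOnP_ne_nil _ _)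
        | cons t ts =>
          rw [hs] at ih1 ih2'
          simp only at ih1
          constructor
          · rw [List.splitOnP_cons, hcb]
            simp only [Bool.false_eq_true, if_false, hs, List.modifyHead_cons]
            rw [pvT, if_neg hc]
            simp only [List.all_cons, ← ih1]
            cases pvInStr c pvBody <;> cases t.all (fun c => pvInStr c pvBody) <;>
              cases ts.all pvGoodTok <;> simp
          · intro _
            rw [List.splitOnP_cons, hcb]
            simp only [Bool.false_eq_true, if_false, hs, List.modifyHead_cons]
            rw [pvT, if_neg hc]
            simp only [List.all_cons, pvGoodTok, List.isEmpty_cons, Bool.not_false, Bool.true_and,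
              ← ih1]
            cases pvInStr c pvBody <;> cases t.all (fun c => pvInStr c pvBody) <;>
              cases ts.all pvGoodTok <;> simp [pvGoodTok]

-- splitOn with the single-character separator '.' is List.splitOnP (· == '.')
lemma pvGo (fuel : Nat) : ∀ (l cur : List Char) (acc : List (List Char)), l.length ≤ fuel →
    PySem.Chars.splitOn.go ['.'] fuel l cur acc =
      acc.reverse ++ (match List.splitOnP (fun c => c == '.') l with
        | [] => [cur.reverse]
        | t :: ts => (cur.reverse ++ t) :: ts) := by
  induction fuel with
  | zero =>
    intro l cur acc hl
    have : l = [] := List.length_eq_zero_iff.mp (Nat.le_zero.mp hl)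
    subst this
    simp [PySem.Chars.splitOn.go, List.splitOnP_nil]
  | succ fuel ih =>
    intro l cur acc hl
    cases l with
    | nil => simp [PySem.Chars.splitOn.go, List.splitOnP_nil]
    | cons c rest =>
      rw [PySem.Chars.splitOn.go]
      by_cases hc : c = '.'
      · subst hc
        have hpre : List.isPrefixOf ['.'] ('.' :: rest) = true := by
          simp [List.isPrefixOf]
        simp only [hpre, if_true]
        have : List.drop (['.'] : List Char).length ('.' :: rest) = rest := by simp
        rw [this, ih rest [] (cur.reverse :: acc)
          (by simpa using Nat.le_of_succ_le_succ (by simpa using hl))]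
        rw [List.splitOnP_cons]
        simp only [beq_self_eq_true, if_true]
        cases hs : List.splitOnP (fun c => c == '.') rest with
        | nil => exact absurd hs (List.splitOnP_ne_nil _ _)
        | cons t ts => simp
      · have hpre : List.isPrefixOf ['.'] (c :: rest) = false := by
          simp [List.isPrefixOf]
          exact fun h => absurd h.symm hc
        simp only [hpre, Bool.false_eq_true, if_false]
        rw [ih rest (c :: cur) acc (by simpa using Nat.le_of_succ_le_succ (by simpa using hl))]
        rw [List.splitOnP_cons]
        have hcb : (c == '.') = false := by simpa using hc
        rw [hcb]
        simp only [Bool.false_eq_true, if_false]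
        cases hs : List.splitOnP (fun c => c == '.') rest with
        | nil => exact absurd hs (List.splitOnP_ne_nil _ _)
        | cons t ts => simp

lemma pvSplitOn_eq (l : List Char) :
    PySem.Chars.splitOn l ['.'] = List.splitOnP (fun c => c == '.') l := by
  unfold PySem.Chars.splitOn
  rw [pvGo (l.length + 1) l [] [] (by omega)]
  cases hs : List.splitOnP (fun c => c == '.') l with
  | nil => exact absurd hs (List.splitOnP_ne_nil _ _)
  | cons t ts => simp

-- the port's token test equals pvGoodTok
lemma pvGood_eq (tok : List Char) :
    (!tok.isEmpty && PySem.Set.issubset (PySem.Set.ofList tok) pvBodySet) = pvGoodTok tok := by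
  unfold pvGoodTok
  congr 1
  rw [Bool.eq_iff_iff, PySem.Set.issubset_iff, List.all_eq_true]
  constructor
  · intro h c hmem
    rw [pvInStr_mem]
    have := h c ((PySem.Set.mem_ofList tok c).mpr hmem)
    simpa [pvBodySet, PySem.Set.mem_ofList] using this
  · intro h c hmem
    have hm := (PySem.Set.mem_ofList tok c).mp hmem
    have := h c hm
    rw [pvInStr_mem] at this
    simpa [pvBodySet, PySem.Set.mem_ofList] using this

-- under A's guards, B's token check equals A's loop result
lemma pvKeyB (fh : List Char)
    (hlen : 1 < fh.length)
    (h0 : pvGetIn fh 0 pvAlnum = true) (h1 : pvGetIn fh (-1) pvAlnum = true) :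
    (PySem.Chars.splitOn fh ['.']).all
        (fun tok => !tok.isEmpty && PySem.Set.issubset (PySem.Set.ofList tok) pvBodySet) =
      (if PySem.Chars.isIn ['.', '.'] fh then false
       else fh.all (fun c => pvInStr c (pvAlnum ++ ['-', '_', '.']))) := by
  have hne : fh ≠ [] := by
    intro h; rw [h] at hlen; simp at hlen
  obtain ⟨c0, hc0, hc0mem⟩ : ∃ c, fh[0]? = some c ∧ pvInStr c pvAlnum = true := by
    unfold pvGetIn at h0
    rw [show ((0 : Int)) = ((0 : Nat) : Int) by norm_num, PySem.List.pyGet?_natCast] at h0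
    cases hg : fh[0]? with
    | none => rw [hg] at h0; simp at h0
    | some c => rw [hg] at h0; exact ⟨c, rfl, h0⟩
  obtain ⟨cl, hcl, hclmem⟩ : ∃ c, fh.getLast? = some c ∧ pvInStr c pvAlnum = true := by
    unfold pvGetIn at h1
    rw [PySem.List.pyGet?_neg_one] at h1
    cases hg : fh.getLast? with
    | none => rw [hg] at h1; simp at h1
    | some c => rw [hg] at h1; exact ⟨c, rfl, h1⟩
  have hlast : fh.getLast? ≠ some '.' := by
    rw [hcl]
    intro h
    exact pvAlnum_no_dot cl hclmem (by simpa using h)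
  have hW := (pvW fh hlast).2 hne
  calc (PySem.Chars.splitOn fh ['.']).all
        (fun tok => !tok.isEmpty && PySem.Set.issubset (PySem.Set.ofList tok) pvBodySet)
      = (List.splitOnP (fun c => c == '.') fh).all pvGoodTok := by
        rw [pvSplitOn_eq, show (fun tok => !tok.isEmpty &&
            PySem.Set.issubset (PySem.Set.ofList tok) pvBodySet) = pvGoodTok from funext pvGood_eq]
    _ = pvT false fh := hW
    _ = (!pvDD fh && fh.all (fun c => pvInStr c (pvAlnum ++ ['-', '_', '.'])) &&
          (false || !(fh.head? == some '.'))) := pvT_eq fh false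
    _ = (if PySem.Chars.isIn ['.', '.'] fh then false
         else fh.all (fun c => pvInStr c (pvAlnum ++ ['-', '_', '.']))) := by
        have hhead : fh.head? = some c0 := by
          cases fh with
          | nil => exact absurd rfl hne
          | cons a t => simpa using hc0
        have hc0ne : (some c0 == some '.') = false := by
          simpa using pvAlnum_no_dot c0 hc0mem
        rw [pvDD_eq_isIn, hhead, hc0ne]
        cases PySem.Chars.isIn ['.', '.'] fh <;> simp

-- ===== VERDICT (by name: the statement is the Claim_ definition above) =====
theorem felhasznalo_spec : Claim_equal_felhasznalo := by
  intro n _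
  unfold Spec_felhasznalo felhasznalo felhasznalo_alt
  by_cases hat : PySem.Chars.isIn ['@'] n.toList = true
  · simp only [hat, if_true]
    set fh := PySem.List.slice n.toList none (some (PySem.Chars.find n.toList ['@'])) with hfh
    by_cases hlen : 1 < fh.length
    · by_cases h0 : pvGetIn fh 0 pvAlnum = true
      · by_cases h1 : pvGetIn fh (-1) pvAlnum = true
        · simp only [hlen, if_true, h0, h1, Bool.and_self, decide_true, Bool.true_and, gt_iff_lt,
            decide_eq_true_eq]
          rw [pvKey fh h0, pvKeyB fh hlen h0 h1]
        · simp [hlen, h0, h1]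
      · simp [hlen, h0]
    · simp [hlen]
  · simp [hat]
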